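-- pv_equiv track=rewrite | github.com/manv-lang/manv | tests/test_cuda_runtime.py | _chunk_sum
-- ===== SOURCE A (Python) =====
-- import math
--
-- def _chunk_sum(values: list[int], chunks: int) -> list[int]:
--     if chunks <= 0:
--         return []
--     width = max(1, math.ceil(len(values) / chunks))
--     out: list[int] = []
--     for start in range(0, len(values), width):
--         out.append(sum(values[start : start + width]))
--     return out
-- ===== SOURCE B (Python) =====
-- def _chunk_sum(values: list[int], chunks: int) -> list[int]:
--     # Prefix-sum table: each chunk total is one subtraction instead of a slice-and-sum.
--     if chunks <= 0:
--         return []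
--     n = len(values)
--     width = max(1, -(-n // chunks))
--     prefix = [0]
--     for v in values:
--         prefix.append(prefix[-1] + v)
--     return [prefix[min(s + width, n)] - prefix[s] for s in range(0, n, width)]
-- ===== Notes on version B (the rewrite author's own statement) =====
-- stated objective: alternative
-- what changed: B builds a prefix-sum table once and computes each chunk total as a subtraction of two table entries, instead of A's per-chunk slice-and-sum.
import Mathlib
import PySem

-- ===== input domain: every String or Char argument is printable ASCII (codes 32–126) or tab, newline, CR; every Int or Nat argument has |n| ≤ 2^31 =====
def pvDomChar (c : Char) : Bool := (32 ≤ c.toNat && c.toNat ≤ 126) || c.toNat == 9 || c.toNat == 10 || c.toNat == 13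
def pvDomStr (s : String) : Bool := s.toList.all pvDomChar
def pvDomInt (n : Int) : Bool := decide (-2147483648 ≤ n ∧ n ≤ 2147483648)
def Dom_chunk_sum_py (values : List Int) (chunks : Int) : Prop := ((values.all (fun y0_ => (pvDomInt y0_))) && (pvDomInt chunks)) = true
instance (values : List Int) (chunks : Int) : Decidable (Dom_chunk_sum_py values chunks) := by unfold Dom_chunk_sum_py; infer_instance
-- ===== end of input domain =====

-- B replaces A's per-chunk slice-and-sum with a prefix-sum table queried by subtraction (alternative decomposition, same O(n) cost).


-- ===== PORT A =====
-- math.ceil(len(values)/chunks) ported as the integer ceiling -((-n)//chunks); exact here: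
-- 0 ≤ n and 0 < chunks with both ≤ 2^31, where float division cannot cross an integer boundary.
def chunk_sum_py (values : List Int) (chunks : Int) : List Int :=
  if chunks ≤ 0 then []
  else
    let width : Int := max 1 (-(PySem.Int.floordiv (-(values.length : Int)) chunks))
    (PySem.List.pyRange 0 (values.length : Int) width).foldl
      (fun out start => out ++ [(PySem.List.slice values (some start) (some (start + width))).sum]) []

-- ===== PORT B =====
def chunk_sum_py_alt (values : List Int) (chunks : Int) : List Int :=
  if chunks ≤ 0 then []
  else
    let n : Int := values.length
    let width : Int := max 1 (-(PySem.Int.floordiv (-n) chunks))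
    let pre : List Int := values.foldl (fun p v => p ++ [PySem.List.pyGetD p (-1) 0 + v]) [0]
    (PySem.List.pyRange 0 n width).map
      (fun s => PySem.List.pyGetD pre (min (s + width) n) 0 - PySem.List.pyGetD pre s 0)

-- ===== PRECONDITION & SPEC =====
def Spec_chunk_sum_py (values : List Int) (chunks : Int) (out : List Int) : Prop := out = chunk_sum_py_alt values chunks
instance (values : List Int) (chunks : Int) (out : List Int) : Decidable (Spec_chunk_sum_py values chunks out) := by unfold Spec_chunk_sum_py; infer_instance

-- ===== CLAIM (what is proved, stated in full; the proofs are below) =====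
def Claim_equal_chunk_sum_py : Prop := ∀ (values : List Int) (chunks : Int), Dom_chunk_sum_py values chunks → Spec_chunk_sum_py values chunks (chunk_sum_py values chunks)

-- ===== LEMMAS AND PROOFS =====

-- The prefix loop of B computes the list of partial sums (generalized over the accumulator).
theorem pv_prefix_fold (vs : List Int) : ∀ (acc : List Int) (t : Int),
    vs.foldl (fun p v => p ++ [PySem.List.pyGetD p (-1) 0 + v]) (acc ++ [t])
      = acc ++ [t] ++ (List.range vs.length).map (fun i => t + (vs.take (i + 1)).sum) := by
  induction vs with
  | nil => simp
  | cons v vs ih =>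
    intro acc t
    have h1 : PySem.List.pyGetD (acc ++ [t]) (-1) 0 = t :=
      PySem.List.pyGetD_neg_one_append_singleton acc t 0
    simp only [List.foldl_cons, h1]
    rw [show acc ++ [t] ++ [t + v] = (acc ++ [t]) ++ [t + v] by simp, ih (acc ++ [t]) (t + v)]
    simp [List.range_succ_eq_map, List.map_map, Function.comp, List.take_succ_cons, add_assoc]

theorem pv_prefix_eq (values : List Int) :
    values.foldl (fun p v => p ++ [PySem.List.pyGetD p (-1) 0 + v]) [0]
      = (List.range (values.length + 1)).map (fun i => (values.take i).sum) := by
  have := pv_prefix_fold values [] 0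
  simp only [List.nil_append] at this
  rw [this]
  simp [List.range_succ_eq_map, List.map_map, Function.comp]

theorem pv_prefix_getD (values : List Int) (i : Nat) (h : i ≤ values.length) :
    ((List.range (values.length + 1)).map (fun i => (values.take i).sum)).getD i 0
      = (values.take i).sum := by
  rw [List.getD_eq_getElem _ _ (by simp; omega)]
  simp

-- Sum of one chunk via the prefix table.
theorem pv_chunk_sum_take (values : List Int) (a w : Nat) :
    ((values.drop a).take w).sum
      = (values.take (min (a + w) values.length)).sum - (values.take a).sum := by
  by_cases h : a + w ≤ values.length
  · rw [min_eq_left h, List.take_add, List.sum_append]; ring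
  · have h' : values.length < a + w := by omega
    rw [min_eq_right (le_of_lt h'), List.take_length,
      List.take_of_length_le (by rw [List.length_drop]; omega)]
    have hsum : (List.take a values).sum + (List.drop a values).sum = values.sum := by
      rw [← List.sum_append, List.take_append_drop]
    omega

-- Pointwise: A's chunk value equals B's table subtraction, for any 0 ≤ s < n.
theorem pv_pointwise (values : List Int) (width s : Int) (hw : 0 < width)
    (hs : 0 ≤ s) (hsn : s < (values.length : Int)) :
    (PySem.List.slice values (some s) (some (s + width))).sum
      = PySem.List.pyGetD ((List.range (values.length + 1)).map (fun i => (values.take i).sum))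
          (min (s + width) (values.length : Int)) 0
        - PySem.List.pyGetD ((List.range (values.length + 1)).map (fun i => (values.take i).sum)) s 0 := by
  set pre := (List.range (values.length + 1)).map (fun i => (values.take i).sum) with hpre
  have hsw : 0 ≤ s + width := by omega
  have hm : min (s + width) (values.length : Int) = ((min (s.toNat + width.toNat) values.length : Nat) : Int) := by
    push_cast; omega
  have hsc : s = ((s.toNat : Nat) : Int) := by omega
  rw [PySem.List.slice_toNat values hs hsw, hm, hsc,
    PySem.List.pyGetD_natCast, PySem.List.pyGetD_natCast, hpre,
    pv_prefix_getD values _ (by omega), pv_prefix_getD values _ (by omega)]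
  have e1 : ((s.toNat : Int) + width).toNat - ((s.toNat : Int)).toNat = width.toNat := by omega
  have e2 : ((s.toNat : Int)).toNat = s.toNat := by omega
  rw [e1, e2, pv_chunk_sum_take values s.toNat width.toNat]

-- ===== VERDICT (by name: the statement is the Claim_ definition above) =====
theorem chunk_sum_py_spec : Claim_equal_chunk_sum_py := by
  intro values chunks _
  unfold Spec_chunk_sum_py chunk_sum_py chunk_sum_py_alt
  by_cases hc : chunks ≤ 0
  · simp [hc]
  · simp only [hc, if_false]
    rw [PySem.List.foldl_append_singleton_eq_map, List.nil_append, pv_prefix_eq]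
    apply List.map_congr_left
    intro s hs
    set width : Int := max 1 (-(PySem.Int.floordiv (-(values.length : Int)) chunks)) with hwdef
    have hw : 0 < width := lt_of_lt_of_le one_pos (le_max_left _ _)
    rw [PySem.List.mem_pyRange_iff_of_pos hw] at hs
    exact pv_pointwise values width s hw hs.1 hs.2.1
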